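-- pv_equiv track=rewrite | github.com/r-jelly/program-solving | baekjoon/2057.py | solution
-- ===== SOURCE A (Python) =====
-- def solution(N):
--     if N==0:
--         return "NO"
--
--     facts = [1, 1]
--     for i in range(2, 20):
--         facts.append(facts[i-1] * i)
--
--     for i in reversed(range(20)):
--         if N >= facts[i]:
--             N -= facts[i]
--
--     if N==0:
--         return "YES"
--     else:
--         return "NO"
-- ===== SOURCE B (Python) =====
-- def solution(N):
--     if N == 0:
--         return "NO"
--     facts = [1, 1]
--     for i in range(2, 20):
--         facts.append(facts[i - 1] * i)
--
--     def can(i, rem):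
--         if rem == 0:
--             return True
--         if i < 0:
--             return False
--         if facts[i] <= rem and can(i - 1, rem - facts[i]):
--             return True
--         return can(i - 1, rem)
--
--     return "YES" if can(19, N) else "NO"
-- ===== Notes on version B (the rewrite author's own statement) =====
-- stated objective: alternative
-- what changed: Replaces the descending greedy subtraction over the factorial list by a recursive include/exclude subset-sum backtracking can(i, rem) over the same list.
import Mathlib
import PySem

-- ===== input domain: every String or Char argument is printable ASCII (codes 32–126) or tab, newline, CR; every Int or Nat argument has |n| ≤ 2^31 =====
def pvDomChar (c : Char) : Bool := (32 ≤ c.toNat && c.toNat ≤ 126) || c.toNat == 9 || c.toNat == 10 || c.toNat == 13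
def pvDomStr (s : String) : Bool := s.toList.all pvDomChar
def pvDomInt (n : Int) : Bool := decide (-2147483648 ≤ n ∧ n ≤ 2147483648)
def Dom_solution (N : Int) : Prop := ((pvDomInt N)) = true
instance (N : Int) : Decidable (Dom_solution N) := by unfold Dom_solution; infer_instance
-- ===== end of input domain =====

-- B replaces A's descending greedy subtraction by include/exclude backtracking over the same factorial list (objective: alternative).


-- ===== PORT A =====
-- facts = [1, 1]; for i in range(2, 20): facts.append(facts[i-1] * i)   (identical lines in A and B)
def pyFacts : List Int :=
  (PySem.List.pyRange 2 20 1).foldl (fun fs i => fs ++ [PySem.List.pyGetD fs (i - 1) 0 * i]) [1, 1]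

def solution (N : Int) : String :=
  if N == 0 then "NO"
  else if ((PySem.List.pyRange 0 20 1).reverse).foldl
      (fun n i => if PySem.List.pyGetD pyFacts i 0 ≤ n then n - PySem.List.pyGetD pyFacts i 0 else n) N
      == 0 then "YES" else "NO"

-- ===== PORT B =====
-- can(i, rem): True if rem == 0; False if i < 0; else include facts[i] (when it fits) or exclude it.
-- Encoded with k = i + 1 : Nat so recursion is structural; k = 0 is Python's i < 0.
def canB (facts : List Int) : Nat → Int → Bool
  | 0, rem => rem == 0
  | j + 1, rem =>
    if rem == 0 then true
    else if PySem.List.pyGetD facts (j : Int) 0 ≤ rem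
            && canB facts j (rem - PySem.List.pyGetD facts (j : Int) 0) then true
    else canB facts j rem

def solution_alt (N : Int) : String :=
  if N == 0 then "NO"
  else if canB pyFacts 20 N then "YES" else "NO"

-- ===== PRECONDITION & SPEC =====
def Spec_solution (N : Int) (out : String) : Prop := out = solution_alt N
instance (N : Int) (out : String) : Decidable (Spec_solution N out) := by unfold Spec_solution; infer_instance

-- ===== CLAIM (what is proved, stated in full; the proofs are below) =====
def Claim_equal_solution : Prop := ∀ (N : Int), Dom_solution N → Spec_solution N (solution N)

-- ===== LEMMAS AND PROOFS =====

-- the factorial list A's first loop builds, as a literal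
def pvF : List Int := [1,1,2,6,24,120,720,5040,40320,362880,3628800,39916800,479001600,6227020800,87178291200,1307674368000,20922789888000,355687428096000,6402373705728000,121645100408832000]

lemma pyFacts_eq : pyFacts = pvF := by decide

-- A's second loop, peeled from the high index down: pvGreedy k rem processes indices k-1, …, 0
def pvGreedy : Nat → Int → Int
  | 0, rem => rem
  | j + 1, rem =>
    if pvF.getD j 0 ≤ rem then pvGreedy j (rem - pvF.getD j 0) else pvGreedy j rem

-- running totals of pvF
def pvT : Nat → Int
  | 0 => 0
  | j + 1 => pvT j + pvF.getD j 0

lemma pvF_pos : ∀ j : Nat, j < 20 → 1 ≤ pvF.getD j 0 := by decide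

lemma pvT_le : ∀ j : Nat, j < 20 → pvT j ≤ pvF.getD j 0 := by decide

lemma pvRange20 : PySem.List.pyRange 0 20 1 = (List.range 20).map (fun n => (n : Int)) := by decide

lemma foldl_range_rev_eq_greedy (k : Nat) (N : Int) :
    ((List.range k).reverse).foldl
      (fun n j => if pvF.getD j 0 ≤ n then n - pvF.getD j 0 else n) N = pvGreedy k N := by
  induction k generalizing N with
  | zero => rfl
  | succ j ih =>
    rw [List.range_succ, List.reverse_append]
    simp only [List.reverse_singleton, List.singleton_append, List.foldl_cons]
    rw [ih]
    conv_rhs => rw [pvGreedy]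
    by_cases h : pvF.getD j 0 ≤ N
    · rw [if_pos h, if_pos h]
    · rw [if_neg h, if_neg h]

lemma A_loop (N : Int) :
    ((PySem.List.pyRange 0 20 1).reverse).foldl
      (fun n i => if PySem.List.pyGetD pvF i 0 ≤ n then n - PySem.List.pyGetD pvF i 0 else n) N
      = pvGreedy 20 N := by
  rw [pvRange20, ← List.map_reverse, List.foldl_map]
  exact foldl_range_rev_eq_greedy 20 N

lemma greedy_zero : ∀ k : Nat, k ≤ 20 → pvGreedy k 0 = 0 := by
  intro k
  induction k with
  | zero => intro _; rfl
  | succ j ih =>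
    intro hk
    have hf := pvF_pos j (by omega)
    rw [pvGreedy, if_neg (by omega), ih (by omega)]

lemma greedy_bound : ∀ k : Nat, k ≤ 20 → ∀ rem : Int, pvGreedy k rem = 0 → rem ≤ pvT k := by
  intro k
  induction k with
  | zero => intro _ rem h; simpa [pvGreedy, pvT] using h.le
  | succ j ih =>
    intro hk rem h
    have hf := pvF_pos j (by omega)
    rw [pvGreedy] at h
    by_cases hle : pvF.getD j 0 ≤ rem
    · rw [if_pos hle] at h
      have := ih (by omega) _ h
      rw [pvT]; omega
    · rw [if_neg hle] at h
      have := ih (by omega) _ h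
      rw [pvT]; omega

lemma can_iff : ∀ k : Nat, k ≤ 20 → ∀ rem : Int, (canB pvF k rem = true ↔ pvGreedy k rem = 0) := by
  intro k
  induction k with
  | zero =>
    intro _ rem
    simp [canB, pvGreedy]
  | succ j ih =>
    intro hk rem
    have hj : j < 20 := by omega
    have hjle : j ≤ 20 := by omega
    rw [canB]
    simp only [PySem.List.pyGetD_natCast]
    by_cases h0 : rem = 0
    · subst h0
      rw [if_pos (by decide)]
      exact ⟨fun _ => greedy_zero _ hk, fun _ => rfl⟩
    · rw [if_neg (by simpa using h0), pvGreedy]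
      by_cases hle : pvF.getD j 0 ≤ rem
      · rw [if_pos hle]
        cases hc : canB pvF j (rem - pvF.getD j 0)
        · rw [if_neg (by simp), ih hjle rem]
          constructor
          · intro hg
            have hb := greedy_bound j hjle rem hg
            have ht := pvT_le j hj
            have heq : rem = pvF.getD j 0 := le_antisymm (by omega) hle
            rw [heq, sub_self]
            exact greedy_zero j hjle
          · intro hz
            exact absurd ((ih hjle _).mpr hz) (by rw [hc]; exact Bool.false_ne_true)
        · rw [if_pos (by rw [Bool.and_true]; exact decide_eq_true hle)]
          exact iff_of_true rfl ((ih hjle _).mp hc)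
      · rw [if_neg hle, if_neg (by rw [decide_eq_false hle]; simp)]
        exact ih hjle rem

lemma solutionA_eq (N : Int) (h : (N == 0) = false) :
    solution N = (if pvGreedy 20 N == 0 then "YES" else "NO") := by
  unfold solution
  rw [h, pyFacts_eq, A_loop]
  simp

lemma solutionB_eq (N : Int) (h : (N == 0) = false) :
    solution_alt N = (if canB pvF 20 N then "YES" else "NO") := by
  unfold solution_alt
  rw [h, pyFacts_eq]
  simp

-- ===== VERDICT (by name: the statement is the Claim_ definition above) =====
theorem solution_spec : Claim_equal_solution := by
  unfold Claim_equal_solution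
  intro N _
  unfold Spec_solution
  by_cases h0 : N = 0
  · simp [solution, solution_alt, h0]
  · have hb : (N == 0) = false := by simpa using h0
    rw [solutionA_eq N hb, solutionB_eq N hb]
    by_cases hg : pvGreedy 20 N = 0
    · rw [if_pos (by simpa using hg), if_pos ((can_iff 20 le_rfl N).mpr hg)]
    · rw [if_neg (by simpa using hg),
        if_neg (fun hc => hg ((can_iff 20 le_rfl N).mp hc))]
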